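-- pv_equiv track=rewrite | github.com/jun9898/krafton-jungle-study | algorithm/2408/240824/solved.py | solve
-- ===== SOURCE A (Python) =====
-- from collections import defaultdict
--
-- def solve(n, k, work, efficiency):
--     count = 0
--     current_count1 = current_count2 = 0
--     current_sum1 = current_sum2 = 0
--     prefix_diff = defaultdict(list)
--     prefix_diff[0].append((0, 0))
--
--     for i in range(n):
--         if work[i] == 1:
--             current_count1 += 1
--             current_sum1 += efficiency[i]
--         elif work[i] == 2:
--             current_count2 += 1
--             current_sum2 += efficiency[i]
--
--         diff = current_count1 - current_count2
--
--         for prev_sum1, prev_sum2 in prefix_diff[diff]: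
--             if abs((current_sum1 - prev_sum1) - (current_sum2 - prev_sum2)) <= k:
--                 count += 1
--
--         prefix_diff[diff].append((current_sum1, current_sum2))
--
--     return count
-- ===== SOURCE B (Python) =====
-- from bisect import bisect_left, bisect_right, insort
--
-- def solve(n, k, work, efficiency):
--     # Per diff-group we keep a SORTED list of prefix values s = sum1 - sum2 and
--     # count earlier prefixes within [s - k, s + k] by binary search instead of
--     # rescanning the whole group linearly.
--     if k < 0:
--         return 0  # |x| <= k is impossible for a negative tolerance
--     count = 0
--     d = s = 0
--     groups = {0: [0]}
--     for i in range(n):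
--         if work[i] == 1:
--             d += 1
--             s += efficiency[i]
--         elif work[i] == 2:
--             d -= 1
--             s -= efficiency[i]
--         lst = groups.setdefault(d, [])
--         count += bisect_right(lst, s + k) - bisect_left(lst, s - k)
--         insort(lst, s)
--     return count
-- ===== Notes on version B (the rewrite author's own statement) =====
-- stated objective: faster
-- what changed: B keeps, per count-difference group, one sorted list of prefix values s = sum1 - sum2 and counts matching earlier prefixes with bisect (binary search) plus insort, instead of A's linear rescan of the whole group at every index.
import Mathlib
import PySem

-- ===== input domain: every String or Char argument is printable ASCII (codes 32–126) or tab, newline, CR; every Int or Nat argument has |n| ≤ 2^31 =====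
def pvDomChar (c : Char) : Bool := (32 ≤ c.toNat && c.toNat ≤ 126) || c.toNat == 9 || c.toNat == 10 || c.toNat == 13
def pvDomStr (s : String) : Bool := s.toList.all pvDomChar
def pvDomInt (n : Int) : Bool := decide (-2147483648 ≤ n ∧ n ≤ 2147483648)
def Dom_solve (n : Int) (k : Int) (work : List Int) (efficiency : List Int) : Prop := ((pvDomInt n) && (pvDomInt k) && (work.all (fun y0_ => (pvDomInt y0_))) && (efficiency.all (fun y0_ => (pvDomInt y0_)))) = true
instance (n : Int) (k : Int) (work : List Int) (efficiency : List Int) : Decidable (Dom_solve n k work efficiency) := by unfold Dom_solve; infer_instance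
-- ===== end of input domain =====

-- B replaces A's linear rescan of each diff-group by a sorted per-group list
-- queried with binary search (bisect); equal return values are proved on all
-- inputs where Python A does not raise IndexError (Pre_solve).

-- ===== PORT A =====
-- Python's abs on ints.
def pyAbs (x : Int) : Int := if x < 0 then -x else x

-- Tail of A's loop body (from `diff = ...` on), shared by the three branches:
-- scan prefix_diff[diff] linearly, then append (current_sum1, current_sum2).
def stepACore (k c1 c2 s1 s2 : Int) (pd : PySem.Dict Int (List (Int × Int))) (cnt : Int) :
    Int × Int × Int × Int × PySem.Dict Int (List (Int × Int)) × Int :=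
  let diff := c1 - c2
  let lst := pd.getD diff []
  let cnt' := lst.foldl (fun acc p =>
    if pyAbs ((s1 - p.1) - (s2 - p.2)) ≤ k then acc + 1 else acc) cnt
  (c1, c2, s1, s2, pd.insert diff (lst ++ [(s1, s2)]), cnt')

-- One iteration of A's `for i in range(n)`; state is
-- (current_count1, current_count2, current_sum1, current_sum2, prefix_diff, count).
-- work[i] / efficiency[i] are ported with pyGetD (IndexError excluded by Pre_solve).
def stepA (k : Int) (work : List Int) (efficiency : List Int)
    (st : Int × Int × Int × Int × PySem.Dict Int (List (Int × Int)) × Int) (i : Int) :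
    Int × Int × Int × Int × PySem.Dict Int (List (Int × Int)) × Int :=
  if PySem.List.pyGetD work i 0 = 1 then
    stepACore k (st.1 + 1) st.2.1 (st.2.2.1 + PySem.List.pyGetD efficiency i 0)
      st.2.2.2.1 st.2.2.2.2.1 st.2.2.2.2.2
  else if PySem.List.pyGetD work i 0 = 2 then
    stepACore k st.1 (st.2.1 + 1) st.2.2.1
      (st.2.2.2.1 + PySem.List.pyGetD efficiency i 0) st.2.2.2.2.1 st.2.2.2.2.2
  else
    stepACore k st.1 st.2.1 st.2.2.1 st.2.2.2.1 st.2.2.2.2.1 st.2.2.2.2.2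

def solve (n : Int) (k : Int) (work : List Int) (efficiency : List Int) : Int :=
  ((PySem.List.pyRange 0 n 1).foldl (stepA k work efficiency)
    (0, 0, 0, 0, PySem.Dict.empty.insert 0 [((0 : Int), (0 : Int))], 0)).2.2.2.2.2

-- ===== PORT B =====
-- Tail of B's loop body: bisect-count inside the sorted group, then insort.
-- bisect_left / bisect_right are PySem.List.bisectLeft / bisectRight; insort is
-- List.orderedInsert (·≤·) (identical resulting list of ints).
def stepBCore (k d s : Int) (g : PySem.Dict Int (List Int)) (cnt : Int) :
    Int × Int × PySem.Dict Int (List Int) × Int :=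
  let lst := g.getD d []
  (d, s, g.insert d (List.orderedInsert (· ≤ ·) s lst),
   cnt + ((PySem.List.bisectRight lst (s + k) : Int) - (PySem.List.bisectLeft lst (s - k) : Int)))

-- One iteration of B's loop; state is (d, s, groups, count).
def stepB (k : Int) (work : List Int) (efficiency : List Int)
    (st : Int × Int × PySem.Dict Int (List Int) × Int) (i : Int) :
    Int × Int × PySem.Dict Int (List Int) × Int :=
  if PySem.List.pyGetD work i 0 = 1 then
    stepBCore k (st.1 + 1) (st.2.1 + PySem.List.pyGetD efficiency i 0) st.2.2.1 st.2.2.2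
  else if PySem.List.pyGetD work i 0 = 2 then
    stepBCore k (st.1 - 1) (st.2.1 - PySem.List.pyGetD efficiency i 0) st.2.2.1 st.2.2.2
  else
    stepBCore k st.1 st.2.1 st.2.2.1 st.2.2.2

def solve_alt (n : Int) (k : Int) (work : List Int) (efficiency : List Int) : Int :=
  if k < 0 then 0
  else ((PySem.List.pyRange 0 n 1).foldl (stepB k work efficiency)
    (0, 0, PySem.Dict.empty.insert 0 [(0 : Int)], 0)).2.2.2

-- ===== PRECONDITION & SPEC =====
-- Pre_solve: exactly the inputs where Python A returns (it raises IndexError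
-- when some i in range(n) is out of range of work, or out of range of
-- efficiency while the work[i] == 1 / work[i] == 2 branch is taken).
def Pre_solve (n : Int) (k : Int) (work : List Int) (efficiency : List Int) : Prop :=
  ∀ i ∈ List.range n.toNat,
    i < work.length ∧ ((work.getD i 0 = 1 ∨ work.getD i 0 = 2) → i < efficiency.length)
instance (n : Int) (k : Int) (work : List Int) (efficiency : List Int) : Decidable (Pre_solve n k work efficiency) := by unfold Pre_solve; infer_instance

def pvWitness_solve : Int × Int × List Int × List Int := (3, 2, [1, 2, 1], [5, 4, 6])

def Spec_solve (n : Int) (k : Int) (work : List Int) (efficiency : List Int) (out : Int) : Prop := out = solve_alt n k work efficiency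
instance (n : Int) (k : Int) (work : List Int) (efficiency : List Int) (out : Int) : Decidable (Spec_solve n k work efficiency out) := by unfold Spec_solve; infer_instance

-- ===== CLAIM (what is proved, stated in full; the proofs are below) =====
def Claim_equal_solve : Prop := ∀ (n : Int) (k : Int) (work : List Int) (efficiency : List Int), Dom_solve n k work efficiency → Pre_solve n k work efficiency → Spec_solve n k work efficiency (solve n k work efficiency)

-- ===== LEMMAS AND PROOFS =====

-- countP of a list whose first b positions satisfy p and whose later positions do not.
theorem countP_split (p : Int → Bool) (l : List Int) (b : Nat) (hb : b ≤ l.length)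
    (h1 : ∀ (j : Nat) (hj : j < l.length), j < b → p l[j] = true)
    (h2 : ∀ (j : Nat) (hj : j < l.length), b ≤ j → p l[j] = false) :
    l.countP p = b := by
  induction l generalizing b with
  | nil => simp at hb ⊢; omega
  | cons x xs ih =>
    cases b with
    | zero =>
      have h0 : p x = false := by simpa using h2 0 (by simp) (by omega)
      have hxs : xs.countP p = 0 := by
        apply List.countP_eq_zero.mpr
        intro a ha
        obtain ⟨j, hj, rfl⟩ := List.mem_iff_getElem.mp ha
        simpa using h2 (j + 1) (by simp; omega) (by omega)
      simp [h0, hxs]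
    | succ b' =>
      have h0 : p x = true := by simpa using h1 0 (by simp) (by omega)
      have hrec := ih b' (by simpa using hb)
        (fun j hj hjb => by simpa using h1 (j + 1) (by simp; omega) (by omega))
        (fun j hj hjb => by simpa using h2 (j + 1) (by simp; omega) (by omega))
      simp [h0, hrec]

theorem bisectLeft_eq_countP (l : List Int) (x : Int) (hs : l.Pairwise (· ≤ ·)) :
    PySem.List.bisectLeft l x = l.countP (fun y => decide (y < x)) := by
  obtain ⟨hb, h1, h2⟩ := PySem.List.bisectLeft_spec l x hs
  exact (countP_split _ l _ hb
    (fun j hj hjb => by simpa using h1 j hj hjb)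
    (fun j hj hjb => by simpa using h2 j hj hjb)).symm

theorem bisectRight_eq_countP (l : List Int) (x : Int) (hs : l.Pairwise (· ≤ ·)) :
    PySem.List.bisectRight l x = l.countP (fun y => decide (y ≤ x)) := by
  obtain ⟨hb, h1, h2⟩ := PySem.List.bisectRight_spec l x hs
  exact (countP_split _ l _ hb
    (fun j hj hjb => by simpa using h1 j hj hjb)
    (fun j hj hjb => by simpa using h2 j hj hjb)).symm

-- #{y ≤ hi} − #{y < lo} = #{lo ≤ y ≤ hi} whenever the window is not inverted past empty.
theorem countP_window (l : List Int) (lo hi : Int) (h : lo ≤ hi + 1) :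
    (l.countP (fun y => decide (y ≤ hi)) : Int) - (l.countP (fun y => decide (y < lo)) : Int)
      = l.countP (fun y => decide (lo ≤ y ∧ y ≤ hi)) := by
  induction l with
  | nil => simp
  | cons a l ih =>
    rw [List.countP_cons, List.countP_cons, List.countP_cons]
    simp only [Bool.decide_and] at ih ⊢
    by_cases h1 : a ≤ hi <;> by_cases h2 : a < lo <;> by_cases h3 : lo ≤ a <;>
      simp [h1, h2, h3] <;> (try push_cast) <;> omega

-- The invariant tying A's loop state to B's loop state: same diff, same
-- prefix value s = sum1 - sum2, same count, and per key B's group is a sorted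
-- permutation of the (sum1 - sum2)-image of A's group.
def LoopInv (a : Int × Int × Int × Int × PySem.Dict Int (List (Int × Int)) × Int)
    (b : Int × Int × PySem.Dict Int (List Int) × Int) : Prop :=
  b.1 = a.1 - a.2.1 ∧
  b.2.1 = a.2.2.1 - a.2.2.2.1 ∧
  b.2.2.2 = a.2.2.2.2.2 ∧
  ∀ key : Int,
    (b.2.2.1.getD key []).Pairwise (· ≤ ·) ∧
    (b.2.2.1.getD key []).Perm ((a.2.2.2.2.1.getD key []).map (fun p => p.1 - p.2))

theorem core_inv (k c1 c2 s1 s2 d s cntA cntB : Int)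
    (pd : PySem.Dict Int (List (Int × Int))) (g : PySem.Dict Int (List Int))
    (hk : 0 ≤ k) (hd : d = c1 - c2) (hs : s = s1 - s2) (hcnt : cntB = cntA)
    (hdict : ∀ key : Int,
      (g.getD key []).Pairwise (· ≤ ·) ∧
      (g.getD key []).Perm ((pd.getD key []).map (fun p => p.1 - p.2))) :
    LoopInv (stepACore k c1 c2 s1 s2 pd cntA) (stepBCore k d s g cntB) := by
  subst hd; subst hs; subst hcnt
  obtain ⟨hsort, hperm⟩ := hdict (c1 - c2)
  simp only [LoopInv, stepACore, stepBCore]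
  refine ⟨trivial, trivial, ?_, ?_⟩
  · -- the counts stay equal: bisect window = linear scan of the group
    rw [PySem.List.foldl_ite_add_one, bisectRight_eq_countP _ _ hsort,
      bisectLeft_eq_countP _ _ hsort, countP_window _ (s1 - s2 - k) (s1 - s2 + k) (by omega),
      hperm.countP_eq, List.countP_map]
    congr 2
    apply List.countP_congr
    intro p _
    simp only [Function.comp, pyAbs, decide_eq_true_eq]
    constructor
    · intro hx; split <;> omega
    · intro hx; split at hx <;> omega
  · -- the per-key group invariant survives the two insertions
    intro key
    rw [PySem.Dict.getD_insert, PySem.Dict.getD_insert]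
    split_ifs with hkey
    · constructor
      · exact List.Pairwise.orderedInsert _ _ hsort
      · have hmap : ((pd.getD (c1 - c2) [] ++ [(s1, s2)]).map (fun p => p.1 - p.2))
            = (pd.getD (c1 - c2) []).map (fun p => p.1 - p.2) ++ [s1 - s2] := by simp
        rw [hmap]
        exact (List.perm_orderedInsert _ _ _).trans
          ((hperm.cons _).trans (List.perm_append_singleton _ _).symm)
    · exact hdict key

theorem step_inv (k : Int) (work efficiency : List Int) (hk : 0 ≤ k)
    (a : Int × Int × Int × Int × PySem.Dict Int (List (Int × Int)) × Int)
    (b : Int × Int × PySem.Dict Int (List Int) × Int) (i : Int)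
    (h : LoopInv a b) : LoopInv (stepA k work efficiency a i) (stepB k work efficiency b i) := by
  obtain ⟨hd, hs, hcnt, hdict⟩ := h
  unfold stepA stepB
  split_ifs with h1 h2 <;>
    exact core_inv _ _ _ _ _ _ _ _ _ _ _ hk (by omega) (by omega) hcnt hdict

theorem foldl_inv (k : Int) (work efficiency : List Int) (hk : 0 ≤ k) (l : List Int)
    (a : Int × Int × Int × Int × PySem.Dict Int (List (Int × Int)) × Int)
    (b : Int × Int × PySem.Dict Int (List Int) × Int) (h : LoopInv a b) :
    LoopInv (l.foldl (stepA k work efficiency) a) (l.foldl (stepB k work efficiency) b) := by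
  induction l generalizing a b with
  | nil => exact h
  | cons x l ih => exact ih _ _ (step_inv k work efficiency hk a b x h)

-- With k < 0 the |·| ≤ k test never fires, so A's count component never moves.
theorem stepACore_count_neg (k c1 c2 s1 s2 : Int) (pd : PySem.Dict Int (List (Int × Int)))
    (cnt : Int) (hk : k < 0) :
    (stepACore k c1 c2 s1 s2 pd cnt).2.2.2.2.2 = cnt := by
  show (pd.getD (c1 - c2) []).foldl
      (fun acc p => if pyAbs ((s1 - p.1) - (s2 - p.2)) ≤ k then acc + 1 else acc) cnt = cnt
  induction pd.getD (c1 - c2) [] generalizing cnt with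
  | nil => rfl
  | cons p l ih =>
    rw [List.foldl_cons, if_neg (by unfold pyAbs; split <;> omega)]
    exact ih cnt

theorem foldl_count_neg (k : Int) (work efficiency : List Int) (hk : k < 0) (l : List Int)
    (a : Int × Int × Int × Int × PySem.Dict Int (List (Int × Int)) × Int) :
    (l.foldl (stepA k work efficiency) a).2.2.2.2.2 = a.2.2.2.2.2 := by
  induction l generalizing a with
  | nil => rfl
  | cons x l ih =>
    rw [List.foldl_cons, ih]
    unfold stepA
    split_ifs <;> exact stepACore_count_neg _ _ _ _ _ _ _ hk

theorem inv_init : LoopInv (0, 0, 0, 0, PySem.Dict.empty.insert 0 [((0 : Int), (0 : Int))], 0)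
    ((0 : Int), (0 : Int), PySem.Dict.empty.insert 0 [(0 : Int)], (0 : Int)) := by
  refine ⟨rfl, rfl, rfl, fun key => ?_⟩
  show ((PySem.Dict.empty.insert 0 [(0 : Int)]).getD key []).Pairwise (· ≤ ·) ∧
    ((PySem.Dict.empty.insert 0 [(0 : Int)]).getD key []).Perm
      (((PySem.Dict.empty.insert 0 [((0 : Int), (0 : Int))]).getD key []).map
        (fun p => p.1 - p.2))
  rw [PySem.Dict.getD_insert, PySem.Dict.getD_insert]
  split_ifs <;> simp [PySem.Dict.getD_empty]

-- ===== VERDICT (by name: the statement is the Claim_ definition above) =====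
theorem solve_spec : Claim_equal_solve := by
  intro n k work efficiency _ _
  unfold Spec_solve solve solve_alt
  by_cases hk : k < 0
  · rw [if_pos hk, foldl_count_neg k work efficiency hk]
  · rw [if_neg hk]
    exact (foldl_inv k work efficiency (by omega) (PySem.List.pyRange 0 n 1) _ _ inv_init).2.2.1.symm
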